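-- pv_equiv track=rewrite | github.com/sunblaze-ucb/AgentSynth | insta_data/evaluate_llm_agents.py | group_tasks_by_sequence
-- ===== SOURCE A (Python) =====
-- def group_tasks_by_sequence(tasks):
--     """
--     Groups tasks into sequences where consecutive tasks share the same website.
--     """
--     if not tasks:
--         return []
--     sequences = []
--     current_sequence = [tasks[0]]
--     current_website = tasks[0].get("website")
--
--     for task in tasks[1:]:
--         website = task.get("website")
--         if website == current_website:
--             current_sequence.append(task)
--         else:
--             sequences.append(current_sequence)
--             current_sequence = [task]
--             current_website = website
--     sequences.append(current_sequence)
--     return sequences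
-- ===== SOURCE B (Python) =====
-- def group_tasks_by_sequence(tasks):
--     if not tasks:
--         return []
--     keys = [t.get("website") for t in tasks]
--     cuts = [0] + [i + 1 for i, (p, q) in enumerate(zip(keys, keys[1:])) if p != q] + [len(tasks)]
--     return [tasks[a:b] for a, b in zip(cuts, cuts[1:])]
-- ===== Notes on version B (the rewrite author's own statement) =====
-- stated objective: alternative
-- what changed: Replaces A's single stateful pass (current_sequence/current_website accumulators with a trailing flush) by a staged pipeline: extract the key list, compute the boundary indices by comparing adjacent key pairs, and rebuild the groups by slicing the input between consecutive cut positions.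
import Mathlib
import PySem

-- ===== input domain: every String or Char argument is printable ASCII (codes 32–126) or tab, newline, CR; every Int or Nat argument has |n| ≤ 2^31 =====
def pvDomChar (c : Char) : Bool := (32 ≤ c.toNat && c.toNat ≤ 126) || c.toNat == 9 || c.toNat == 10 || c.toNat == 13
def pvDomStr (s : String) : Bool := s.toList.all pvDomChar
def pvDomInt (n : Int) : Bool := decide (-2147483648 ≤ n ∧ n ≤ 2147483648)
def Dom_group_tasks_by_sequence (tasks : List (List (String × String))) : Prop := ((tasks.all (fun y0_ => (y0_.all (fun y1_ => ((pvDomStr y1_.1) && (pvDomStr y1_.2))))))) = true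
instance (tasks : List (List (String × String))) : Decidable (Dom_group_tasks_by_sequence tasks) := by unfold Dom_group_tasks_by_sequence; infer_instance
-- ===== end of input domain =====

-- B is an alternative, staged formulation of the same O(n) task: extract the key list, compute all
-- boundary indices by comparing adjacent keys, then rebuild the groups by slicing between consecutive cuts.

-- ===== PORT A =====
-- task.get("website"): first-match lookup in the association list
def getW (t : List (String × String)) : Option String :=
  (t.find? (fun p => p.1 == "website")).map (·.2)

def group_tasks_by_sequence (tasks : List (List (String × String))) : List (List (List (String × String))) :=
  match tasks with
  | [] => []
  | t0 :: rest =>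
    let r := rest.foldl
      (fun (st : List (List (List (String × String))) × List (List (String × String)) × Option String) task =>
        let w := getW task
        if w == st.2.2 then (st.1, st.2.1 ++ [task], st.2.2)
        else (st.1 ++ [st.2.1], [task], w))
      ([], [t0], getW t0)
    r.1 ++ [r.2.1]

-- ===== PORT B =====
def group_tasks_by_sequence_alt (tasks : List (List (String × String))) : List (List (List (String × String))) :=
  match tasks with
  | [] => []
  | _ :: _ =>
    let keys := tasks.map getW
    let cuts : List Int :=
      [0] ++ ((PySem.List.enumerate (keys.zip (PySem.List.slice keys (some 1) none))).filter
                (fun x => x.2.1 != x.2.2)).map (fun x => x.1 + 1) ++ [(tasks.length : Int)]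
    (cuts.zip (PySem.List.slice cuts (some 1) none)).map
      (fun ab => PySem.List.slice tasks (some ab.1) (some ab.2))

-- ===== PRECONDITION & SPEC =====
def Spec_group_tasks_by_sequence (tasks : List (List (String × String))) (out : List (List (List (String × String)))) : Prop := out = group_tasks_by_sequence_alt tasks
instance (tasks : List (List (String × String))) (out : List (List (List (String × String)))) : Decidable (Spec_group_tasks_by_sequence tasks out) := by unfold Spec_group_tasks_by_sequence; infer_instance

-- ===== CLAIM (what is proved, stated in full; the proofs are below) =====
def Claim_equal_group_tasks_by_sequence : Prop := ∀ (tasks : List (List (String × String))), Dom_group_tasks_by_sequence tasks → Spec_group_tasks_by_sequence tasks (group_tasks_by_sequence tasks)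

-- ===== LEMMAS AND PROOFS =====

-- Reference: grouping by maximal runs of equal keys (takeWhile/dropWhile).
def gSpan : List (List (String × String)) → List (List (List (String × String)))
  | [] => []
  | t :: ts =>
    (t :: ts.takeWhile (fun u => getW u == getW t)) ::
      gSpan (ts.dropWhile (fun u => getW u == getW t))
termination_by l => l.length
decreasing_by
  simpa using Nat.lt_succ_of_le (List.length_dropWhile_le _ _)

-- A-side: the fold, written as a recursion on the remaining tasks.
def gAux (w : Option String) (cur : List (List (String × String))) :
    List (List (String × String)) → List (List (List (String × String)))
  | [] => [cur]
  | t :: ts =>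
    if getW t == w then gAux w (cur ++ [t]) ts
    else cur :: gAux (getW t) [t] ts

theorem foldA_eq_gAux (rest : List (List (String × String)))
    (seqs : List (List (List (String × String)))) (cur : List (List (String × String)))
    (w : Option String) :
    (let r := rest.foldl
      (fun (st : List (List (List (String × String))) × List (List (String × String)) × Option String) task =>
        let wt := getW task
        if wt == st.2.2 then (st.1, st.2.1 ++ [task], st.2.2)
        else (st.1 ++ [st.2.1], [task], wt))
      (seqs, cur, w)
     r.1 ++ [r.2.1]) = seqs ++ gAux w cur rest := by
  induction rest generalizing seqs cur w with
  | nil => simp [gAux]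
  | cons t ts ih =>
    simp only [List.foldl_cons, gAux]
    by_cases h : getW t == w
    · simp only [h, if_pos]
      exact ih seqs (cur ++ [t]) w
    · simp only [h, if_neg, Bool.false_eq_true, not_false_iff]
      have := ih (seqs ++ [cur]) [t] (getW t)
      simpa using this

theorem gAux_eq_gSpan (rest : List (List (String × String)))
    (w : Option String) (cur : List (List (String × String))) :
    gAux w cur rest =
      (cur ++ rest.takeWhile (fun u => getW u == w)) ::
        gSpan (rest.dropWhile (fun u => getW u == w)) := by
  induction rest generalizing w cur with
  | nil => simp [gAux, gSpan]
  | cons t ts ih =>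
    by_cases h : getW t == w
    · simp only [gAux, h, if_pos, List.takeWhile_cons, List.dropWhile_cons]
      rw [ih w (cur ++ [t])]
      simp
    · simp only [gAux, h, if_neg, Bool.false_eq_true, not_false_iff,
        List.takeWhile_cons, List.dropWhile_cons]
      rw [ih (getW t) [t]]
      simp [gSpan]

theorem A_eq_gSpan (tasks : List (List (String × String))) :
    group_tasks_by_sequence tasks = gSpan tasks := by
  match tasks with
  | [] => simp [group_tasks_by_sequence, gSpan]
  | t0 :: rest =>
    have h := foldA_eq_gAux rest [] [t0] (getW t0)
    simp only [group_tasks_by_sequence]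
    rw [h]
    rw [gAux_eq_gSpan]
    simp [gSpan]

-- B-side reference: the same cut pipeline, with Nat-valued indices.
def brkN (l : List (Option String × Option String)) (s : Nat) : List Nat :=
  match l with
  | [] => []
  | a :: l' => (if a.1 != a.2 then [s + 1] else []) ++ brkN l' (s + 1)

def cutsN (tasks : List (List (String × String))) : List Nat :=
  0 :: (brkN ((tasks.map getW).zip (tasks.map getW).tail) 0 ++ [tasks.length])

def BN (tasks : List (List (String × String))) : List (List (List (String × String))) :=
  match tasks with
  | [] => []
  | _ :: _ =>
    ((cutsN tasks).zip (cutsN tasks).tail).map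
      (fun ab => (tasks.drop ab.1).take (ab.2 - ab.1))

theorem brkN_shift (l : List (Option String × Option String)) (s : Nat) :
    brkN l s = (brkN l 0).map (· + s) := by
  induction l generalizing s with
  | nil => simp [brkN]
  | cons a l' ih =>
    simp only [brkN]
    rw [ih (s + 1), ih 1]
    simp only [List.map_append, List.map_map]
    by_cases h : a.1 != a.2 <;>
      simp [h, Function.comp, Nat.add_comm, Nat.add_left_comm]

theorem port_breaks (l : List (Option String × Option String)) (s : Nat) :
    ((PySem.List.enumerate l (s : Int)).filter (fun x => x.2.1 != x.2.2)).map
        (fun x => x.1 + 1) = (brkN l s).map (fun n : Nat => (n : Int)) := by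
  induction l generalizing s with
  | nil => simp [PySem.List.enumerate_nil, brkN]
  | cons a l' ih =>
    have hcast : ((s : Int) + 1) = ((s + 1 : Nat) : Int) := by push_cast; ring
    simp only [PySem.List.enumerate_cons, brkN, List.filter_cons]
    by_cases h : a.1 != a.2
    · simp only [h, if_pos, List.map_cons, List.map_append]
      rw [hcast, ih (s + 1)]
      simp
    · simp only [h, if_neg, Bool.false_eq_true, not_false_iff]
      rw [hcast, ih (s + 1)]
      simp

theorem castmap_zip_slice (c : List Nat) (xs : List (List (String × String))) :
    ((c.map (fun n : Nat => (n : Int))).zip ((c.map (fun n : Nat => (n : Int))).tail)).map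
        (fun ab => PySem.List.slice xs (some ab.1) (some ab.2)) =
      (c.zip c.tail).map (fun ab => (xs.drop ab.1).take (ab.2 - ab.1)) := by
  rw [← List.map_tail, List.zip_map, List.map_map]
  apply List.map_congr_left
  intro ab _
  simp [Prod.map, PySem.List.slice_natCast]

theorem alt_eq_BN (tasks : List (List (String × String))) :
    group_tasks_by_sequence_alt tasks = BN tasks := by
  match tasks with
  | [] => rfl
  | t :: ts =>
    simp only [group_tasks_by_sequence_alt, BN]
    rw [PySem.List.slice_from_one]
    have hb := port_breaks (((t :: ts).map getW).zip (((t :: ts).map getW).tail)) 0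
    rw [Nat.cast_zero] at hb
    rw [hb]
    have hc : ([(0 : Int)] ++
        (brkN (((t :: ts).map getW).zip (((t :: ts).map getW).tail)) 0).map (fun n : Nat => (n : Int)) ++
        [((t :: ts).length : Int)]) = (cutsN (t :: ts)).map (fun n : Nat => (n : Int)) := by
      simp [cutsN]
    rw [hc, PySem.List.slice_from_one, castmap_zip_slice]

-- one-step structure of the cut list
theorem cutsN_cons_cons (t u : List (String × String)) (r : List (List (String × String))) :
    cutsN (t :: u :: r) =
      0 :: (if getW t != getW u then (cutsN (u :: r)).map (· + 1)
            else ((cutsN (u :: r)).tail).map (· + 1)) := by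
  simp only [cutsN, List.map_cons, List.tail_cons, List.zip_cons_cons, brkN,
    List.length_cons]
  rw [brkN_shift (((getW u :: r.map getW)).zip (r.map getW)) 1]
  by_cases h : getW t != getW u
  · simp [h, List.map_append]
  · simp [h, List.map_append]

theorem shift_slice (l : List (Nat × Nat)) (t : List (String × String))
    (ts : List (List (String × String))) :
    (l.map (Prod.map (· + 1) (· + 1))).map
        (fun ab => ((t :: ts).drop ab.1).take (ab.2 - ab.1)) =
      l.map (fun ab => (ts.drop ab.1).take (ab.2 - ab.1)) := by
  rw [List.map_map]
  apply List.map_congr_left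
  intro ab _
  simp [Prod.map, Nat.succ_sub_succ]

theorem pairs_shift (d0 : Nat) (d' : List Nat) :
    ((0 :: ((d0 :: d').map (· + 1))).zip ((d0 :: d').map (· + 1))) =
      (0, d0 + 1) :: ((d0 :: d').zip d').map (Prod.map (· + 1) (· + 1)) := by
  have h : ((d0 :: d').map (fun x => x + 1)).zip (d'.map (fun x => x + 1)) =
      ((d0 :: d').zip d').map (Prod.map (fun x => x + 1) (fun x => x + 1)) := List.zip_map
  simp only [List.map_cons] at h ⊢
  rw [List.zip_cons_cons, h]

theorem gSpan_nil : gSpan [] = [] := by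
  rw [gSpan]

theorem BN_cons_ne (t u : List (String × String)) (r : List (List (String × String)))
    (h : (getW t != getW u) = true) :
    BN (t :: u :: r) = [t] :: BN (u :: r) := by
  have hcut := cutsN_cons_cons t u r
  rw [h, if_pos rfl] at hcut
  have hc : cutsN (u :: r) = 0 :: (brkN (((u :: r).map getW).zip ((u :: r).map getW).tail) 0
      ++ [(u :: r).length]) := rfl
  simp only [BN, hcut, hc, List.tail_cons]
  rw [pairs_shift, List.map_cons, shift_slice]
  simp

theorem BN_cons_eq (t u : List (String × String)) (r : List (List (String × String)))
    (h : (getW t != getW u) = false) :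
    ∃ g gs, BN (u :: r) = g :: gs ∧ BN (t :: u :: r) = (t :: g) :: gs := by
  have hcut := cutsN_cons_cons t u r
  rw [h] at hcut
  simp only [Bool.false_eq_true, if_neg, not_false_iff] at hcut
  have hc : cutsN (u :: r) = 0 :: (brkN (((u :: r).map getW).zip ((u :: r).map getW).tail) 0
      ++ [(u :: r).length]) := rfl
  rcases hE : brkN (((u :: r).map getW).zip ((u :: r).map getW).tail) 0 ++ [(u :: r).length] with _ | ⟨d0, d'⟩
  · exact absurd hE (by simp)
  · rw [hE] at hc
    refine ⟨(u :: r).take d0,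
      ((d0 :: d').zip d').map (fun ab => ((u :: r).drop ab.1).take (ab.2 - ab.1)), ?_, ?_⟩
    · simp only [BN, hc, List.tail_cons, List.zip_cons_cons, List.map_cons]
      simp
    · rw [hc] at hcut
      simp only [List.tail_cons] at hcut
      simp only [BN, hcut, List.tail_cons]
      rw [pairs_shift, List.map_cons, shift_slice]
      simp [List.take_succ_cons]

theorem gSpan_cons (t : List (String × String)) (ts : List (List (String × String))) :
    gSpan (t :: ts) =
      (t :: ts.takeWhile (fun u => getW u == getW t)) ::
        gSpan (ts.dropWhile (fun u => getW u == getW t)) := by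
  rw [gSpan]

theorem BN_eq_gSpan (tasks : List (List (String × String))) :
    BN tasks = gSpan tasks := by
  induction tasks with
  | nil => rw [gSpan_nil]; rfl
  | cons t ts ih =>
    match ts, ih with
    | [], _ =>
      rw [gSpan_cons]
      simp only [List.takeWhile_nil, List.dropWhile_nil, gSpan_nil]
      simp [BN, cutsN, brkN]
    | u :: r, ih =>
      by_cases h : getW u = getW t
      · have hbeq : (getW u == getW t) = true := by simp [h]
        have hne : (getW t != getW u) = false := by simp [h]
        obtain ⟨g, gs, hB, hB'⟩ := BN_cons_eq t u r hne
        have hg : gSpan (u :: r) = g :: gs := by rw [← ih, hB]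
        rw [gSpan_cons] at hg
        injection hg with hg1 hg2
        rw [hB']
        conv_rhs => rw [gSpan_cons]
        rw [List.takeWhile_cons, List.dropWhile_cons]
        simp only [hbeq, if_pos]
        rw [← h, hg1, hg2]
      · have hne : (getW t != getW u) = true := by
          simp only [bne_iff_ne, ne_eq]
          exact fun hh => h hh.symm
        have hb : (getW u == getW t) = false := by simp [h]
        rw [BN_cons_ne t u r hne, ih]
        conv_rhs => rw [gSpan_cons]
        rw [List.takeWhile_cons, List.dropWhile_cons]
        simp [hb]

-- ===== VERDICT (by name: the statement is the Claim_ definition above) =====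
theorem group_tasks_by_sequence_spec : Claim_equal_group_tasks_by_sequence := by
  intro tasks _
  unfold Spec_group_tasks_by_sequence
  rw [A_eq_gSpan, alt_eq_BN, BN_eq_gSpan]
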